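-- pv_equiv track=rewrite | github.com/gopalmeena/coala-bears | bears/general/AnnotationBear.py | calc_line_col
-- ===== SOURCE A (Python) =====
-- def calc_line_col(file, pos_to_find):
--     """
--     Calculate line number and column in the file, from position
--     """
--     line = 1
--     pos = -1
--     pos_new_line = file.find('\n')
--     while True:
--         if pos_new_line == -1:
--             return (line, pos_to_find-pos)
--
--         if pos_to_find <= pos_new_line:
--             return (line, pos_to_find - pos)
--
--         else:
--             line += 1
--             pos = pos_new_line
--             pos_new_line = file.find('\n', pos_new_line + 1)
-- ===== SOURCE B (Python) =====
-- def calc_line_col(file, pos_to_find):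
--     """
--     Calculate line number and column in the file, from position
--     """
--     prefix = file[:pos_to_find]
--     return (prefix.count('\n') + 1, pos_to_find - prefix.rfind('\n'))
-- ===== Notes on version B (the rewrite author's own statement) =====
-- stated objective: simpler
-- what changed: A's newline-hopping while loop (repeated file.find('\n', ...)) is replaced by a direct two-operation formula on the prefix before the position: line = prefix.count('\n') + 1 and column = pos_to_find - prefix.rfind('\n'), with no loop written at all.
-- outside the precondition, e.g. on calc_line_col('a\nb', -1): A returns (1, 0), B returns (2, -2)
import Mathlib
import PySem

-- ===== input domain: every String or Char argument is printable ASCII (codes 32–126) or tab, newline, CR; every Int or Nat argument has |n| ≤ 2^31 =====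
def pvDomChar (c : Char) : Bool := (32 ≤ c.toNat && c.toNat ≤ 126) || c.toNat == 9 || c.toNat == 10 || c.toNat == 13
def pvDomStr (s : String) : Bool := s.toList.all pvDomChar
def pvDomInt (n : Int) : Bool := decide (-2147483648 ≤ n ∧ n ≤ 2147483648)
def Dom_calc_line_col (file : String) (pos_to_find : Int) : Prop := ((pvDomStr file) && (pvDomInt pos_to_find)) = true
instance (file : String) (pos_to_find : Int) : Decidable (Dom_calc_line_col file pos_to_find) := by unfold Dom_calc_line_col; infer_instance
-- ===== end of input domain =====

-- B replaces A's newline-hopping while loop by two direct string operations on the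
-- prefix before the position: count('\n') for the line and rfind('\n') for the column
-- (objective: simpler; equivalence is claimed on non-negative positions, see Pre_).

-- ===== PORT A =====
-- the 'while True' loop; fuel file.length + 1 is enough because each iteration moves
-- pos_new_line strictly forward (the fuel-0 branch is unreachable, totality guard only)
def calcALoop (file : List Char) (pos_to_find : Int) (line pos pos_new_line : Int) : Nat → Int × Int
  | 0 => (line, pos_to_find - pos)
  | fuel + 1 =>
    if pos_new_line = -1 then (line, pos_to_find - pos)
    else if pos_to_find ≤ pos_new_line then (line, pos_to_find - pos)
    else calcALoop file pos_to_find (line + 1) pos_new_line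
      (PySem.Chars.findFrom file ['\n'] (pos_new_line + 1)) fuel

def calc_line_col (file : String) (pos_to_find : Int) : Int × Int :=
  calcALoop file.toList pos_to_find 1 (-1) (PySem.Chars.find file.toList ['\n'])
    (file.toList.length + 1)

-- ===== PORT B =====
def calc_line_col_alt (file : String) (pos_to_find : Int) : Int × Int :=
  let pfx := PySem.Str.slice file none (some pos_to_find)
  ((PySem.Str.count pfx "\n" : Int) + 1, pos_to_find - PySem.Str.rfind pfx "\n")

-- ===== PRECONDITION & SPEC =====
-- Pre_ excludes negative positions, which are outside the natural domain of a file
-- position: A returns (1, pos_to_find+1) there by accident of its loop, while B's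
-- prefix slice would read from the end of the string.
def Pre_calc_line_col (file : String) (pos_to_find : Int) : Prop := 0 ≤ pos_to_find
instance (file : String) (pos_to_find : Int) : Decidable (Pre_calc_line_col file pos_to_find) := by unfold Pre_calc_line_col; infer_instance
def pvWitness_calc_line_col : String × Int := ("ab\ncd\n\nx", 5)

def Spec_calc_line_col (file : String) (pos_to_find : Int) (out : Int × Int) : Prop := out = calc_line_col_alt file pos_to_find
instance (file : String) (pos_to_find : Int) (out : Int × Int) : Decidable (Spec_calc_line_col file pos_to_find out) := by unfold Spec_calc_line_col; infer_instance

-- ===== CLAIM (what is proved, stated in full; the proofs are below) =====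
def Claim_equal_calc_line_col : Prop := ∀ (file : String) (pos_to_find : Int), Dom_calc_line_col file pos_to_find → Pre_calc_line_col file pos_to_find → Spec_calc_line_col file pos_to_find (calc_line_col file pos_to_find)

-- ===== LEMMAS AND PROOFS =====
theorem countGo_eq (l : List Char) : ∀ (fuel acc : Nat), l.length ≤ fuel →
    PySem.Chars.count.go ['\n'] fuel l acc = acc + l.count '\n' := by
  induction l with
  | nil => intro fuel acc _; cases fuel <;> simp [PySem.Chars.count.go]
  | cons h t ih =>
    intro fuel acc hf
    cases fuel with
    | zero => simp at hf
    | succ f =>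
      simp only [PySem.Chars.count.go, List.isPrefixOf, List.count_cons]
      by_cases hh : h = '\n'
      · simp [hh, ih f (acc+1) (by simpa using hf)]; omega
      · simp [hh, Ne.symm hh, ih f acc (by simpa using hf)]


theorem count_eq_count (s : List Char) : PySem.Chars.count s ['\n'] = s.count '\n' := by
  simpa [PySem.Chars.count] using countGo_eq s s.length 0 le_rfl
theorem nlPrefix_iff (l : List Char) : ['\n'] <+: l ↔ l.head? = some '\n' := by
  cases l with
  | nil => simp
  | cons a t => simp [List.cons_prefix_cons, eq_comm]



theorem nl_mem_of_prefix {l : List Char} (h : ['\n'] <+: l) : '\n' ∈ l :=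
  List.mem_of_mem_head? ((nlPrefix_iff l).mp h)

theorem nlPrefix_drop_append {xs ys : List Char} (hy : '\n' ∉ ys) (j : Nat) (hj : j ≤ xs.length) :
    (['\n'] <+: List.drop j (xs ++ ys)) ↔ (['\n'] <+: List.drop j xs) := by
  rw [List.drop_append]
  rcases Nat.lt_or_ge j xs.length with hlt | hge
  · rw [nlPrefix_iff, nlPrefix_iff]
    cases hd : List.drop j xs with
    | nil => have := List.length_drop (l := xs) (i := j); rw [hd] at this; simp at this; omega
    | cons a t => simp
  · have hxl : j = xs.length := by omega
    subst hxl
    rw [List.drop_length]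
    simp only [List.nil_append]
    constructor
    · intro h; exact absurd (List.mem_of_mem_drop (nl_mem_of_prefix h)) hy
    · intro h; exact absurd (nl_mem_of_prefix h) (by simp)

theorem not_nlPrefix_drop_append_ge {xs ys : List Char} (hy : '\n' ∉ ys) (j : Nat)
    (hj : xs.length ≤ j) : ¬ (['\n'] <+: List.drop j (xs ++ ys)) := by
  rw [List.drop_append, List.drop_eq_nil_of_le hj, List.nil_append]
  intro h
  exact absurd (List.mem_of_mem_drop (nl_mem_of_prefix h)) hy

theorem rfindGo_append_le (xs ys : List Char) (hy : '\n' ∉ ys) :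
    ∀ j, j ≤ xs.length →
    PySem.Chars.rfind.go (xs ++ ys) ['\n'] j = PySem.Chars.rfind.go xs ['\n'] j := by
  intro j
  induction j with
  | zero =>
    intro hj
    simp only [PySem.Chars.rfind.go, List.isPrefixOf_iff_prefix]
    have := nlPrefix_drop_append hy 0 (by omega)
    simp only [List.drop_zero] at this
    by_cases h : ['\n'] <+: xs
    · simp [h, this.mpr h]
    · simp [h, this]
  | succ j ih =>
    intro hj
    simp only [PySem.Chars.rfind.go, List.isPrefixOf_iff_prefix]
    have hdrop := nlPrefix_drop_append hy (j+1) hj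
    by_cases h : ['\n'] <+: List.drop (j+1) xs
    · simp [h, hdrop.mpr h]
    · simp [h, hdrop, ih (by omega)]

theorem rfindGo_append_ge (xs ys : List Char) (hy : '\n' ∉ ys) :
    ∀ j, xs.length ≤ j →
    PySem.Chars.rfind.go (xs ++ ys) ['\n'] j = PySem.Chars.rfind.go (xs ++ ys) ['\n'] xs.length := by
  intro j
  induction j with
  | zero => intro hj; exact congrArg (PySem.Chars.rfind.go (xs ++ ys) ['\n']) (by omega)
  | succ j ih =>
    intro hj
    rcases Nat.lt_or_ge xs.length (j+1) with hlt | hge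
    · simp only [PySem.Chars.rfind.go, List.isPrefixOf_iff_prefix]
      have := not_nlPrefix_drop_append_ge hy (j+1) (by omega)
      simp [this, ih (by omega)]
    · have : xs.length = j + 1 := by omega
      rw [this]

theorem rfind_append_not_mem (xs ys : List Char) (hy : '\n' ∉ ys) :
    PySem.Chars.rfind (xs ++ ys) ['\n'] = PySem.Chars.rfind xs ['\n'] := by
  unfold PySem.Chars.rfind
  rw [show (xs ++ ys).length = xs.length + ys.length by simp,
    rfindGo_append_ge xs ys hy _ (by omega),
    rfindGo_append_le xs ys hy _ le_rfl]

theorem rfind_append_nl (xs : List Char) :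
    PySem.Chars.rfind (xs ++ ['\n']) ['\n'] = (xs.length : Int) := by
  unfold PySem.Chars.rfind
  rw [show (xs ++ ['\n']).length = xs.length + 1 by simp]
  simp only [PySem.Chars.rfind.go, List.isPrefixOf_iff_prefix]
  have h1 : ¬ (['\n'] <+: List.drop (xs.length + 1) (xs ++ ['\n'])) := by
    rw [List.drop_eq_nil_of_le (by simp)]; simp
  have h2 : List.drop xs.length (xs ++ ['\n']) = ['\n'] := by
    rw [List.drop_append, List.drop_length]; simp
  cases hx : xs.length with
  | zero =>
    have : xs = [] := List.eq_nil_of_length_eq_zero hx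
    subst this
    simp only [PySem.Chars.rfind.go, List.isPrefixOf_iff_prefix]
    simp
  | succ m =>
    rw [hx] at h1 h2
    simp only [PySem.Chars.rfind.go, List.isPrefixOf_iff_prefix]
    rw [if_neg h1]
    simp [h2]

theorem nl_not_mem_take {l : List Char} {m fN : Nat} (hm : m ≤ fN)
    (h : ∀ i < fN, ¬ ['\n'] <+: l.drop i) : '\n' ∉ l.take m := by
  intro hmem
  obtain ⟨i, hi, hEq⟩ := List.mem_iff_getElem.mp hmem
  have hil : i < l.length := by
    have := hi; simp [List.length_take] at this; omega
  refine h i (by have := hi; simp [List.length_take] at this; omega) ?_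
  rw [nlPrefix_iff, List.head?_drop]
  rw [List.getElem_take] at hEq
  simp [List.getElem?_eq_getElem hil, hEq]

theorem loopA_eq (cs : List Char) (p : Int) (hp : 0 ≤ p) :
    ∀ (fuel : Nat) (line pos : Int),
    -1 ≤ pos → pos < p → (pos + 1).toNat ≤ cs.length →
    pos = PySem.Chars.rfind (cs.take (pos + 1).toNat) ['\n'] →
    cs.length - (pos + 1).toNat < fuel →
    calcALoop cs p line pos (PySem.Chars.findFrom cs ['\n'] (pos + 1)) fuel
      = (line + (((cs.take p.toNat).drop (pos + 1).toNat).count '\n' : Int),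
         p - PySem.Chars.rfind (cs.take p.toNat) ['\n']) := by
  intro fuel
  induction fuel with
  | zero => intro line pos _ _ _ _ hfuel; omega
  | succ fuel ih =>
    intro line pos h1 h2 h3 hinv hfuel
    set k := (pos + 1).toNat with hk
    have hcast : pos + 1 = (k : Int) := by omega
    have hkp : k ≤ p.toNat := by omega
    have hsplit : cs.take p.toNat = cs.take k ++ (cs.take p.toNat).drop k := by
      conv_lhs => rw [← List.take_append_drop k (cs.take p.toNat)]
      rw [List.take_take, min_eq_left hkp]
    rw [hcast, PySem.Chars.findFrom_natCast cs ['\n'] k h3]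
    by_cases hf : PySem.Chars.find (cs.drop k) ['\n'] = -1
    · -- no further newline
      have hnone : '\n' ∉ cs.drop k := by
        rw [PySem.Chars.find_eq_neg_one_iff] at hf
        intro hmem; exact hf ((List.singleton_infix_iff _ _).mpr hmem)
      have hreg : '\n' ∉ (cs.take p.toNat).drop k := by
        rw [List.drop_take]
        intro hmem; exact hnone (List.mem_of_mem_take hmem)
      rw [if_pos hf]
      simp only [calcALoop]
      rw [List.count_eq_zero.mpr hreg, hsplit,
        rfind_append_not_mem _ _ hreg, ← hinv]
      simp
    · rw [if_neg hf]
      have hf0 : 0 ≤ PySem.Chars.find (cs.drop k) ['\n'] := by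
        have := PySem.Chars.neg_one_le_find (cs.drop k) ['\n']; omega
      set f := PySem.Chars.find (cs.drop k) ['\n'] with hfdef
      obtain ⟨hpre, hmin⟩ := PySem.Chars.find_spec hf0
      rw [← hfdef] at hpre hmin
      set j := k + f.toNat with hj
      have hdd : List.drop f.toNat (List.drop k cs) = List.drop j cs := by
        rw [List.drop_drop]
      have hjn : cs[j]? = some '\n' := by
        rw [← List.head?_drop]
        exact (nlPrefix_iff _).mp (hdd ▸ hpre)
      have hjlen : j < cs.length := by
        rcases List.getElem?_eq_some_iff.mp hjn with ⟨h, _⟩; exact h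
      have hJ : (k : Int) + f = (j : Int) := by omega
      simp only [calcALoop]
      rw [if_neg (by omega)]
      by_cases hple : p ≤ (k : Int) + f
      · -- region [k, p) newline-free
        rw [if_pos hple]
        have hreg : '\n' ∉ (cs.take p.toNat).drop k := by
          rw [List.drop_take]
          exact nl_not_mem_take (by omega) hmin
        rw [List.count_eq_zero.mpr hreg, hsplit,
          rfind_append_not_mem _ _ hreg, ← hinv]
        simp
      · rw [if_neg hple]
        have hjp : (j : Int) < p := by omega
        have hrec := ih (line + 1) ((k : Int) + f)
        rw [hJ] at hrec
        have hjtn : ((j : Int) + 1).toNat = j + 1 := by omega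
        have htake : cs.take (j + 1) = cs.take j ++ ['\n'] := by
          rw [List.take_add_one]
          simp [hjn]
        have hrfj : ((j : Int)) = PySem.Chars.rfind (cs.take (j+1)) ['\n'] := by
          rw [htake, rfind_append_nl, List.length_take, min_eq_left (by omega)]
        rw [hJ, hrec (by omega) (by omega) (by omega) (by rw [hjtn]; exact hrfj)
          (by omega)]
        -- now equate the pair
        have hcount : ((cs.take p.toNat).drop k).count '\n'
            = ((cs.take p.toNat).drop (j+1)).count '\n' + 1 := by
          have hsplit2 : (cs.take p.toNat).drop k
              = ((cs.take p.toNat).drop k).take f.toNat ++ ((cs.take p.toNat).drop k).drop f.toNat := by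
            rw [List.take_append_drop]
          have hfree : '\n' ∉ ((cs.take p.toNat).drop k).take f.toNat := by
            rw [List.drop_take, List.take_take, min_eq_left (by omega)]
            exact nl_not_mem_take le_rfl hmin
          have hdj : ((cs.take p.toNat).drop k).drop f.toNat = (cs.take p.toNat).drop j := by
            rw [List.drop_drop]
          have hjlt : j < (cs.take p.toNat).length := by
            rw [List.length_take]; omega
          have hcons : (cs.take p.toNat).drop j = '\n' :: (cs.take p.toNat).drop (j+1) := by
            rw [List.drop_eq_getElem_cons hjlt]
            congr 1
            rw [List.getElem_take]
            have := List.getElem?_eq_some_iff.mp hjn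
            rcases this with ⟨_, h⟩; exact h
          conv_lhs => rw [hsplit2]
          rw [List.count_append, List.count_eq_zero.mpr hfree, hdj, hcons]
          simp
        rw [hjtn, hcount]
        simp only [Prod.mk.injEq]
        constructor
        · push_cast; ring
        · trivial

theorem rfind_nil : PySem.Chars.rfind [] ['\n'] = -1 := by decide

-- ===== VERDICT (by name: the statement is the Claim_ definition above) =====
theorem calc_line_col_spec : Claim_equal_calc_line_col := by
  intro file p _ hp
  unfold Pre_calc_line_col at hp
  unfold Spec_calc_line_col calc_line_col calc_line_col_alt
  have hA := loopA_eq file.toList p hp (file.toList.length + 1) 1 (-1)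
    (le_refl _) (by omega) (by omega) (by simpa using rfind_nil.symm) (by omega)
  rw [show ((-1 : Int) + 1) = 0 by norm_num, PySem.Chars.findFrom_zero] at hA
  rw [hA]
  have hslice : (PySem.Str.slice file none (some p)).toList = file.toList.take p.toNat := by
    simp [PySem.Str.toList_slice, PySem.List.slice_to _ hp]
  simp only [PySem.Str.count_eq, PySem.Str.rfind_eq, hslice]
  rw [show ("\n").toList = ['\n'] by rfl, count_eq_count]
  simp [add_comm]
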